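-- pv_equiv track=rewrite | github.com/Kevins-repos/ENGRLabs | tyr_test_cases.py | AgePointScore
-- ===== SOURCE A (Python) =====
-- def AgePointScore(age, point):
--     threshold = 79
--     x = 0
--     while(age<=threshold):
--         #decrease threshold to the lower range
--         threshold-=5
--         #as range lowers, points change accordingly
--         x+=1
--         #last range is special since its a larger range
--         if(age<=34 and age>=20):
--             x-=1
--     #arrays start from 0 and go to 10 even if only 9 elements
--     return point[x-1]
-- ===== SOURCE B (Python) =====
-- def AgePointScore(age, point):
--     # Closed form: the loop counts thresholds 79,74,... >= age, and in [20,34]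
--     # the decrement cancels every increment, leaving x = 0 (index -1).
--     if 20 <= age <= 34 or age > 79:
--         return point[-1]
--     return point[(79 - age) // 5]
-- ===== Notes on version B (the rewrite author's own statement) =====
-- stated objective: simpler
-- what changed: Replaces the while-loop that counts 5-wide age brackets with a closed-form branch: point[-1] for 20<=age<=34 or age>79, else point[(79-age)//5].
import Mathlib
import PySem

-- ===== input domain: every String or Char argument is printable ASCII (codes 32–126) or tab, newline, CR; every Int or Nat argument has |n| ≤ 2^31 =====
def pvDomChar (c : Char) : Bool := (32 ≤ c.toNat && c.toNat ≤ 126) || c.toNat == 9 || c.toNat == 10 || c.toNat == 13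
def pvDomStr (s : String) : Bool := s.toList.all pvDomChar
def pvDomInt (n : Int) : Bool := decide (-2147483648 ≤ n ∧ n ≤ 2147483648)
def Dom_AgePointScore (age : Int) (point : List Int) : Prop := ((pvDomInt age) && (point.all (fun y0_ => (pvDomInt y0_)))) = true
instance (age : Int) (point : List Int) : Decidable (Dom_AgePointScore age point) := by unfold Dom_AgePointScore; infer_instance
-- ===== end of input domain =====

-- B replaces A's bracket-counting while-loop with a closed-form index; proof that they agree wherever A returns.
-- ===== PORT A =====
-- the while-loop of A: while age <= threshold: threshold -= 5; x += 1; if 20 <= age <= 34: x -= 1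
def AgePointScoreLoop (age threshold x : Int) : Int :=
  if age ≤ threshold then
    AgePointScoreLoop age (threshold - 5) (if age ≤ 34 ∧ 20 ≤ age then (x + 1) - 1 else x + 1)
  else x
termination_by (threshold - age + 5).toNat
decreasing_by omega

def AgePointScore (age : Int) (point : List Int) : Int :=
  (PySem.List.pyGet? point (AgePointScoreLoop age 79 0 - 1)).getD 0

-- ===== PORT B =====
def AgePointScore_alt (age : Int) (point : List Int) : Int :=
  if (20 ≤ age ∧ age ≤ 34) ∨ 79 < age then (PySem.List.pyGet? point (-1)).getD 0
  else (PySem.List.pyGet? point (PySem.Int.floordiv (79 - age) 5)).getD 0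

-- ===== PRECONDITION & SPEC =====
-- Pre_ excludes exactly the inputs where point[x-1] raises IndexError in A
-- (empty point when the index is -1; index (79-age)//5 beyond the end otherwise).
def Pre_AgePointScore (age : Int) (point : List Int) : Prop :=
  if (20 ≤ age ∧ age ≤ 34) ∨ 79 < age then point ≠ []
  else PySem.Int.floordiv (79 - age) 5 < (point.length : Int)
instance (age : Int) (point : List Int) : Decidable (Pre_AgePointScore age point) := by
  unfold Pre_AgePointScore; infer_instance
def pvWitness_AgePointScore : Int × List Int := (42, [1, 2, 3, 4, 5, 6, 7, 8, 9])

def Spec_AgePointScore (age : Int) (point : List Int) (out : Int) : Prop := out = AgePointScore_alt age point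
instance (age : Int) (point : List Int) (out : Int) : Decidable (Spec_AgePointScore age point out) := by unfold Spec_AgePointScore; infer_instance

-- ===== CLAIM (what is proved, stated in full; the proofs are below) =====
def Claim_equal_AgePointScore : Prop := ∀ (age : Int) (point : List Int), Dom_AgePointScore age point → Pre_AgePointScore age point → Spec_AgePointScore age point (AgePointScore age point)

-- ===== LEMMAS AND PROOFS =====
theorem loop_mid (age x : Int) (h1 : 20 ≤ age) (h2 : age ≤ 34) (t : Int) :
    AgePointScoreLoop age t x = x := by
  by_cases h : age ≤ t
  · rw [AgePointScoreLoop.eq_def]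
    simp only [h, if_pos, h1, h2, and_self, add_sub_cancel_right]
    exact loop_mid age x h1 h2 (t - 5)
  · rw [AgePointScoreLoop.eq_def]; simp [h]
termination_by (t - age + 5).toNat
decreasing_by omega

theorem loop_count (age x : Int) (hn : ¬(age ≤ 34 ∧ 20 ≤ age)) (t : Int) (hle : age ≤ t) :
    AgePointScoreLoop age t x = x + PySem.Int.floordiv (t - age) 5 + 1 := by
  rw [AgePointScoreLoop.eq_def]
  simp only [hle, if_pos, if_neg hn]
  have h5 : (0:Int) < 5 := by omega
  by_cases h : age ≤ t - 5
  · rw [loop_count age (x + 1) hn (t - 5) h]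
    rw [PySem.Int.floordiv_eq_ediv_of_pos h5, PySem.Int.floordiv_eq_ediv_of_pos h5]
    omega
  · rw [AgePointScoreLoop.eq_def]
    simp only [if_neg h]
    rw [PySem.Int.floordiv_eq_ediv_of_pos h5]
    omega
termination_by (t - age + 5).toNat
decreasing_by omega

-- ===== VERDICT (by name: the statement is the Claim_ definition above) =====
theorem AgePointScore_spec : Claim_equal_AgePointScore := by
  intro age point _ hpre
  unfold Spec_AgePointScore AgePointScore AgePointScore_alt
  by_cases hmid : (20 ≤ age ∧ age ≤ 34) ∨ 79 < age
  · rw [if_pos hmid]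
    rcases hmid with ⟨h1, h2⟩ | hgt
    · rw [loop_mid age 0 h1 h2 79]; norm_num
    · rw [AgePointScoreLoop.eq_def]
      rw [if_neg (by omega : ¬ age ≤ 79)]; norm_num
  · rw [if_neg hmid]
    have hle : age ≤ 79 := by omega
    have hn : ¬(age ≤ 34 ∧ 20 ≤ age) := by omega
    rw [loop_count age 0 hn 79 hle]
    norm_num
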